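-- pv_equiv track=rewrite | github.com/dinleo/CodeTest | PyCode/Programmers_Test/Kakao/kakao_2023/2차/pro_solution.py | find_room_pos
-- ===== SOURCE A (Python) =====
-- def find_room_pos(hotel, day, amount):
--     empty_count = count_empty_room(hotel, day)
--     for i in range(len(hotel)):
--         if empty_count[i] < amount:
--             continue
--         j = 0
--         while j + amount <= len(hotel[i]):
--             if hotel[i][j] <= day:
--                 start = j
--                 pos = True
--                 for a in range(amount - 1):
--                     j += 1
--                     if day < hotel[i][j]:
--                         pos = False
--                         break
--                 if pos:
--                     return (i + 1) * 1000 + (start + 1)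
--             else:
--                 j += 1
--     return 0
--
-- def count_empty_room(hotel, day):
--     floor = len(hotel)
--     count = [0 for _ in range(floor)]
--     for i in range(floor):
--         for j in hotel[i]:
--             if j <= day:
--                 count[i] += 1
--     return count
-- ===== SOURCE B (Python) =====
-- def find_room_pos(hotel, day, amount):
--     for i, floor in enumerate(hotel):
--         run = 0
--         for j, room in enumerate(floor):
--             if room <= day:
--                 run += 1
--                 if run >= amount:
--                     return (i + 1) * 1000 + (j - amount + 2)
--             else:
--                 run = 0
--     return 0
-- ===== Notes on version B (the rewrite author's own statement) =====
-- stated objective: simpler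
-- what changed: Replaced A's per-floor prefilter (count_empty_room) plus window scan with inner backtracking pointer by a single flat run-length counter per floor that resets on unavailable rooms and returns when the streak reaches amount.
-- outside the precondition, e.g. on find_room_pos([[0]], 0, 0): A returns 1001, B returns 1002
import Mathlib
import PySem

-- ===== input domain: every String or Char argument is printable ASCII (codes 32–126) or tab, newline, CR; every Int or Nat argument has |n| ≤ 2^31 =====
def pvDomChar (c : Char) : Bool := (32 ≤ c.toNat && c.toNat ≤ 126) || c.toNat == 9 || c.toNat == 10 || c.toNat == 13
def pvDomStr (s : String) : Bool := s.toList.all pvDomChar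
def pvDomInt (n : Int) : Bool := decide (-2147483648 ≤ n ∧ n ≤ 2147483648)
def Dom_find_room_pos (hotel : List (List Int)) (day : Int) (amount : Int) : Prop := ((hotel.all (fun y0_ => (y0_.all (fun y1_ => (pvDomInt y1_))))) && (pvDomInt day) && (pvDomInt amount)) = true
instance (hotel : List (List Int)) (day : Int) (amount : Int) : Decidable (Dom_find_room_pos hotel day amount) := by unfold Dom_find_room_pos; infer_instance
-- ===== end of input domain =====

-- B replaces A's prefilter + window scan with backtracking by a single run-length
-- counter per floor (objective: simpler); return value proved equal for amount ≥ 1.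

-- ===== PORT A =====

-- count_empty_room: per floor, count rooms ≤ day (the Python builds the list with an
-- inner for-loop accumulating into count[i]; we map that accumulation over the floors).
def count_empty_room (hotel : List (List Int)) (day : Int) : List Int :=
  hotel.map (fun row => row.foldl (fun c j => if j ≤ day then c + 1 else c) 0)

-- inner 'for a in range(amount - 1): j += 1; if day < hotel[i][j]: pos = False; break'
-- returns (pos, final j).  pyGet? = none is Python's IndexError (unreachable under Pre_).
def innerCheck (row : List Int) (day : Int) (j : Int) : Nat → Bool × Int
  | 0 => (true, j)
  | k+1 =>
    match PySem.List.pyGet? row (j+1) with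
    | none => (false, j+1)   -- Python raises IndexError here; unreachable under Pre_
    | some v => if day < v then (false, j+1) else innerCheck row day (j+1) k

-- the 'while j + amount <= len(hotel[i])' loop; some v = early return, none = fall through.
-- j increases by at least 1 per iteration, so the fuel
-- ((len - amount + 1).toNat) supplied by floorA dominates the iteration count and the
-- fuel-exhaustion branch is unreachable; fuel only makes the recursion structural.
def whileA (row : List Int) (day : Int) (amount : Int) (i : Int) : Nat → Int → Option Int
  | 0, _ => none
  | fuel+1, j =>
    if j + amount ≤ (row.length : Int) then
      match PySem.List.pyGet? row j with
      | none => none   -- Python raises IndexError here; unreachable under Pre_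
      | some v =>
        if v ≤ day then
          match innerCheck row day j (amount - 1).toNat with
          | (true, _) => some ((i+1)*1000 + (j + 1))
          | (false, j') => whileA row day amount i fuel j'
        else whileA row day amount i fuel (j+1)
    else none

-- 'for i in range(len(hotel)): if empty_count[i] < amount: continue; …'
def floorA (day : Int) (amount : Int) : List (List Int × Int) → Int → Int
  | [], _ => 0
  | (row, c) :: rest, i =>
    if c < amount then floorA day amount rest (i+1)
    else
      match whileA row day amount i (((row.length : Int) - amount + 1).toNat) 0 with
      | some v => v
      | none => floorA day amount rest (i+1)

def find_room_pos (hotel : List (List Int)) (day : Int) (amount : Int) : Int :=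
  let empty_count := count_empty_room hotel day
  floorA day amount (hotel.zip empty_count) 0

-- ===== PORT B =====

-- per-floor run-length scan: run = current streak of rooms ≤ day; return at run == amount
def runScanB (day : Int) (amount : Int) (i : Int) : List Int → Int → Int → Option Int
  | [], _, _ => none
  | r :: rest, j, run =>
    if r ≤ day then
      if run + 1 ≥ amount then some ((i+1)*1000 + (j - amount + 2))
      else runScanB day amount i rest (j+1) (run+1)
    else runScanB day amount i rest (j+1) 0

def floorsB (day : Int) (amount : Int) : List (List Int) → Int → Int
  | [], _ => 0
  | row :: rest, i =>
    match runScanB day amount i row 0 0 with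
    | some v => v
    | none => floorsB day amount rest (i+1)

def find_room_pos_alt (hotel : List (List Int)) (day : Int) (amount : Int) : Int :=
  floorsB day amount hotel 0

-- ===== PRECONDITION & SPEC =====

-- Pre_ restricts to the function's natural domain amount ≥ 1: for amount ≤ 0 (a
-- nonsensical request for a non-positive number of rooms) A raises IndexError whenever
-- the first floor has no room ≤ day, and otherwise returns a degenerate
-- first-available-room position that is an artefact of its window arithmetic.
def Pre_find_room_pos (hotel : List (List Int)) (day : Int) (amount : Int) : Prop :=
  1 ≤ amount

instance (hotel : List (List Int)) (day : Int) (amount : Int) : Decidable (Pre_find_room_pos hotel day amount) := by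
  unfold Pre_find_room_pos; infer_instance

def pvWitness_find_room_pos : List (List Int) × Int × Int := ([[0, 5], [1, 1]], 1, 2)

def Spec_find_room_pos (hotel : List (List Int)) (day : Int) (amount : Int) (out : Int) : Prop := out = find_room_pos_alt hotel day amount
instance (hotel : List (List Int)) (day : Int) (amount : Int) (out : Int) : Decidable (Spec_find_room_pos hotel day amount out) := by unfold Spec_find_room_pos; infer_instance

-- ===== CLAIM (what is proved, stated in full; the proofs are below) =====
def Claim_equal_find_room_pos : Prop := ∀ (hotel : List (List Int)) (day : Int) (amount : Int), Dom_find_room_pos hotel day amount → Pre_find_room_pos hotel day amount → Spec_find_room_pos hotel day amount (find_room_pos hotel day amount)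


-- ===== LEMMAS AND PROOFS =====

-- reference predicate: the window of a rooms starting at s is entirely ≤ day
def windowAll (row : List Int) (day : Int) (a : Nat) (s : Nat) : Bool :=
  ((row.drop s).take a).all (fun v => decide (v ≤ day))

theorem windowAll_false_shape (row : List Int) (day : Int) (a : Nat) (s : Nat)
    (h : windowAll row day a s = false) : s < row.length ∧ 1 ≤ a := by
  unfold windowAll at h
  rcases Nat.lt_or_ge s row.length with hs | hs
  · refine ⟨hs, ?_⟩
    by_contra hna
    have ha0 : a = 0 := by omega
    simp [ha0] at h
  · rw [List.drop_eq_nil_of_le hs] at h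
    simp at h

-- reference function: first good window start ≥ s, as an Option Nat
def firstGood (row : List Int) (day : Int) (a : Nat) (s : Nat) : Option Nat :=
  if h : s + a ≤ row.length then
    if hw : windowAll row day a s = true then some s
    else firstGood row day a (s+1)
  else none
termination_by (row.length + 1 - s)
decreasing_by
  have hw' : windowAll row day a s = false := by
    revert hw; cases windowAll row day a s <;> simp
  have := windowAll_false_shape row day a s hw'
  omega

theorem windowAll_eq_true_iff (row : List Int) (day : Int) (a s : Nat) :
    windowAll row day a s = true ↔
      ∀ (k : Nat) (h : s + k < row.length), k < a → row[s+k] ≤ day := by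
  unfold windowAll
  rw [List.all_eq_true]
  constructor
  · intro h k hk hka
    have hlen : k < ((row.drop s).take a).length := by
      simp [List.length_take, List.length_drop]; omega
    have he : ((row.drop s).take a)[k] = row[s+k] := by
      simp [List.getElem_take, List.getElem_drop]
    have hm := h _ (List.getElem_mem hlen)
    rw [he] at hm
    simpa using hm
  · intro h v hv
    obtain ⟨k, hk, rfl⟩ := List.mem_iff_getElem.mp hv
    have hlen := hk
    simp only [List.length_take, List.length_drop] at hlen
    have he : ((row.drop s).take a)[k] = row[s+k] := by
      simp [List.getElem_take, List.getElem_drop]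
    rw [he]
    simp only [decide_eq_true_eq]
    exact h k (by omega) (by omega)

theorem windowAll_false_of_bad (row : List Int) (day : Int) (a : Nat) (s bad : Nat)
    (h1 : s ≤ bad) (h2 : bad < s + a) (hbl : bad < row.length) (hbad : day < row[bad]) :
    windowAll row day a s = false := by
  by_contra hc
  have hc' : windowAll row day a s = true := by
    revert hc; cases windowAll row day a s <;> simp
  have hx := (windowAll_eq_true_iff row day a s).mp hc' (bad - s) (by omega) (by omega)
  have he : s + (bad - s) = bad := by omega
  simp only [he] at hx
  omega

theorem firstGood_none (row : List Int) (day : Int) (a : Nat) (s : Nat)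
    (h : row.length < s + a) : firstGood row day a s = none := by
  rw [firstGood, dif_neg (by omega)]

theorem firstGood_good (row : List Int) (day : Int) (a : Nat) (s : Nat)
    (h1 : s + a ≤ row.length) (h2 : windowAll row day a s = true) :
    firstGood row day a s = some s := by
  rw [firstGood, dif_pos h1, dif_pos h2]

theorem firstGood_step (row : List Int) (day : Int) (a : Nat) (s : Nat)
    (h2 : windowAll row day a s = false) :
    firstGood row day a s = firstGood row day a (s+1) := by
  by_cases h1 : s + a ≤ row.length
  · rw [firstGood, dif_pos h1, dif_neg (by simp [h2])]
  · rw [firstGood_none row day a s (by omega), firstGood_none row day a (s+1) (by omega)]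

theorem firstGood_skip (row : List Int) (day : Int) (a : Nat) :
    ∀ (d s : Nat), (∀ t, s ≤ t → t < s + d → windowAll row day a t = false) →
      firstGood row day a s = firstGood row day a (s + d) := by
  intro d
  induction d with
  | zero => intro s _; rfl
  | succ d ih =>
    intro s h
    rw [firstGood_step row day a s (h s le_rfl (by omega))]
    rw [ih (s+1) (fun t h1 h2 => h t (by omega) (by omega))]
    congr 1
    omega

theorem firstGood_some_aux (row : List Int) (day : Int) (a : Nat) :
    ∀ (n s x : Nat), row.length + 1 - s ≤ n → firstGood row day a s = some x →
      s ≤ x ∧ x + a ≤ row.length ∧ windowAll row day a x = true := by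
  intro n
  induction n with
  | zero =>
    intro s x hn h
    rw [firstGood_none row day a s (by omega)] at h
    exact absurd h (by simp)
  | succ n ih =>
    intro s x hn h
    by_cases h1 : s + a ≤ row.length
    · by_cases h2 : windowAll row day a s = true
      · rw [firstGood_good row day a s h1 h2] at h
        obtain rfl : s = x := by simpa using h
        exact ⟨le_rfl, h1, h2⟩
      · have h2' : windowAll row day a s = false := by
          revert h2; cases windowAll row day a s <;> simp
        rw [firstGood_step row day a s h2'] at h
        have hs := windowAll_false_shape row day a s h2'
        have := ih (s+1) x (by omega) h
        exact ⟨by omega, this.2.1, this.2.2⟩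
    · rw [firstGood_none row day a s (by omega)] at h
      exact absurd h (by simp)

theorem firstGood_some (row : List Int) (day : Int) (a : Nat) (s x : Nat)
    (h : firstGood row day a s = some x) :
    s ≤ x ∧ x + a ≤ row.length ∧ windowAll row day a x = true :=
  firstGood_some_aux row day a (row.length + 1 - s) s x le_rfl h

theorem foldl_count_eq (day : Int) :
    ∀ (l : List Int) (c : Int),
      l.foldl (fun c j => if j ≤ day then c + 1 else c) c =
        c + (l.countP (fun v => decide (v ≤ day)) : Int) := by
  intro l
  induction l with
  | nil => intro c; simp
  | cons x xs ih =>
    intro c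
    simp only [List.foldl_cons, List.countP_cons]
    by_cases hx : x ≤ day
    · rw [if_pos hx, ih]
      simp [hx]
      push_cast
      ring
    · rw [if_neg hx, ih]
      simp [hx]

theorem prefilter (row : List Int) (day : Int) (amount : Int) (ha : 1 ≤ amount)
    (hc : (row.countP (fun v => decide (v ≤ day)) : Int) < amount) :
    firstGood row day amount.toNat 0 = none := by
  cases h : firstGood row day amount.toNat 0 with
  | none => rfl
  | some s =>
    exfalso
    obtain ⟨-, hlen, hw⟩ := firstGood_some row day amount.toNat 0 s h
    have e1 : row.countP (fun v => decide (v ≤ day)) =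
        (row.take s).countP (fun v => decide (v ≤ day)) +
        (row.drop s).countP (fun v => decide (v ≤ day)) := by
      conv_lhs => rw [← List.take_append_drop s row]
      rw [List.countP_append]
    have e2 : (row.drop s).countP (fun v => decide (v ≤ day)) =
        ((row.drop s).take amount.toNat).countP (fun v => decide (v ≤ day)) +
        ((row.drop s).drop amount.toNat).countP (fun v => decide (v ≤ day)) := by
      conv_lhs => rw [← List.take_append_drop amount.toNat (row.drop s)]
      rw [List.countP_append]
    have e3 : ((row.drop s).take amount.toNat).countP (fun v => decide (v ≤ day)) =
        ((row.drop s).take amount.toNat).length := by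
      rw [List.countP_eq_length]
      exact List.all_eq_true.mp hw
    have e4 : ((row.drop s).take amount.toNat).length = amount.toNat := by
      simp only [List.length_take, List.length_drop]
      omega
    omega

theorem innerCheck_spec (row : List Int) (day : Int) :
    ∀ (k : Nat) (j : Int), 0 ≤ j → j + (k : Int) < (row.length : Int) →
      (innerCheck row day j k = (true, j + (k : Int)) ∧
        ∀ t : Int, j < t → t ≤ j + (k : Int) →
          ∃ v, PySem.List.pyGet? row t = some v ∧ v ≤ day)
      ∨ (∃ f v, innerCheck row day j k = (false, f) ∧ j < f ∧ f ≤ j + (k : Int) ∧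
          PySem.List.pyGet? row f = some v ∧ day < v) := by
  intro k
  induction k with
  | zero =>
    intro j hj hlen
    left
    constructor
    · simp [innerCheck]
    · intro t h1 h2
      exfalso
      simp only [Nat.cast_zero] at h2
      omega
  | succ k ih =>
    intro j hj hlen
    have hlen' : j + 1 < (row.length : Int) := by push_cast at hlen; omega
    have hget := PySem.List.pyGet?_eq_some_getElem (xs := row) (i := j + 1) (by omega) hlen'
    by_cases hd : day < row[(j+1).toNat]
    · right
      refine ⟨j+1, row[(j+1).toNat], ?_, by omega, by push_cast; omega, hget, hd⟩
      simp [innerCheck, hget, hd]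
    · have step : innerCheck row day j (k+1) = innerCheck row day (j+1) k := by
        simp [innerCheck, hget, hd]
      rcases ih (j+1) (by omega) (by push_cast at hlen ⊢; omega) with ⟨h1, h2⟩ | ⟨f, w, hf1, hf2, hf3, hf4, hf5⟩
      · left
        constructor
        · rw [step, h1]
          congr 1
          push_cast
          ring
        · intro t ht1 ht2
          by_cases htj : t = j + 1
          · subst htj
            exact ⟨row[(j+1).toNat], hget, by omega⟩
          · exact h2 t (by omega) (by push_cast at ht2 ⊢; omega)
      · right
        exact ⟨f, w, by rw [step]; exact hf1, by omega, by push_cast at hf3 ⊢; omega, hf4, hf5⟩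

theorem whileA_eq (row : List Int) (day : Int) (amount : Int) (i : Int) (ha : 1 ≤ amount) :
    ∀ (n : Nat) (j : Int), 0 ≤ j → ((row.length : Int) - amount - j + 1).toNat ≤ n →
      whileA row day amount i n j =
        (firstGood row day amount.toNat j.toNat).map
          (fun (s : Nat) => (i+1)*1000 + (s : Int) + 1) := by
  intro n
  induction n with
  | zero =>
    intro j hj hn
    rw [whileA, firstGood_none row day amount.toNat j.toNat (by omega)]
    rfl
  | succ n ih =>
    intro j hj hn
    by_cases hg : j + amount ≤ (row.length : Int)
    · have hjlen : j < (row.length : Int) := by omega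
      have hget := PySem.List.pyGet?_eq_some_getElem (xs := row) (i := j) hj hjlen
      rw [whileA, if_pos hg]
      split
      case _ heq => rw [hget] at heq; exact absurd heq (by simp)
      case _ v heq =>
        have hv : v = row[j.toNat] := by rw [hget] at heq; simpa using heq.symm
        subst hv
        have hkcast : (((amount - 1).toNat : Int)) = amount - 1 := by omega
        by_cases hvd : row[j.toNat] ≤ day
        · rw [if_pos hvd]
          rcases innerCheck_spec row day (amount - 1).toNat j hj (by rw [hkcast]; omega)
            with ⟨hic, hall⟩ | ⟨f, w, hic, hf2, hf3, hf4, hf5⟩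
          · split
            case _ x hmx =>
              -- window at j is good
              have hw : windowAll row day amount.toNat j.toNat = true := by
                rw [windowAll_eq_true_iff]
                intro k hk hka
                by_cases hk0 : k = 0
                · subst hk0; simpa using hvd
                · obtain ⟨w, hw1, hw2⟩ := hall (j + k) (by omega)
                    (by rw [hkcast]; omega)
                  have hg2 := PySem.List.pyGet?_eq_some_getElem (xs := row) (i := j + k)
                    (by omega) (by push_cast; omega)
                  rw [hg2] at hw1
                  have hww : row[(j + (k:Int)).toNat] = w := by simpa using hw1
                  have hidx : (j + (k:Int)).toNat = j.toNat + k := by omega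
                  simp only [hidx] at hww
                  rw [hww]
                  exact hw2
              rw [firstGood_good row day amount.toNat j.toNat (by omega) hw]
              simp only [Option.map_some]
              congr 1
              omega
            case _ j' hmx =>
              rw [hic] at hmx
              exact absurd hmx (by simp)
          · split
            case _ x hmx =>
              rw [hic] at hmx
              exact absurd hmx (by simp)
            case _ j' hmx =>
              rw [hic] at hmx
              have hjf : j' = f := by simpa using hmx.symm
              rw [hjf]
              have hflen : f < (row.length : Int) := by rw [hkcast] at hf3; omega
              have hg2 := PySem.List.pyGet?_eq_some_getElem (xs := row) (i := f) (by omega) hflen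
              rw [hg2] at hf4
              have hfw : row[f.toNat] = w := by simpa using hf4
              rw [ih f (by omega) (by omega)]
              have hskip := firstGood_skip row day amount.toNat (f.toNat - j.toNat) j.toNat
                (fun t h1 h2 => windowAll_false_of_bad row day amount.toNat t f.toNat
                  (by omega) (by rw [hkcast] at hf3; omega) (by omega) (by rw [hfw]; omega))
              rw [hskip, show j.toNat + (f.toNat - j.toNat) = f.toNat from by omega]
        · rw [if_neg hvd]
          rw [ih (j+1) (by omega) (by omega)]
          have hwf : windowAll row day amount.toNat j.toNat = false :=
            windowAll_false_of_bad row day amount.toNat j.toNat j.toNat le_rfl (by omega)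
              (by omega) (by omega)
          rw [firstGood_step row day amount.toNat j.toNat hwf]
          rw [show (j+1).toNat = j.toNat + 1 from by omega]
    · rw [whileA, if_neg hg, firstGood_none row day amount.toNat j.toNat (by omega)]
      rfl

theorem runScan_eq (row : List Int) (day : Int) (amount : Int) (i : Int) (ha : 1 ≤ amount) :
    ∀ (suffix : List Int) (jn run : Nat),
      suffix = row.drop jn → run ≤ jn → (run : Int) < amount →
      (∀ t : Nat, jn - run ≤ t → t < jn → ∃ h : t < row.length, row[t] ≤ day) →
      runScanB day amount i suffix (jn : Int) (run : Int) =
        (firstGood row day amount.toNat (jn - run)).map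
          (fun (s : Nat) => (i+1)*1000 + (s : Int) + 1) := by
  intro suffix
  induction suffix with
  | nil =>
    intro jn run hdrop hrj hra hstreak
    have hlen : row.length ≤ jn := by
      have := congrArg List.length hdrop
      simp [List.length_drop] at this
      omega
    rw [firstGood_none row day amount.toNat (jn - run) (by omega)]
    rfl
  | cons r rest ih =>
    intro jn run hdrop hrj hra hstreak
    have h0 : row[jn]? = some r := by
      have h0' : (row.drop jn)[0]? = some r := by rw [← hdrop]; rfl
      rw [List.getElem?_drop] at h0'
      simpa using h0'
    obtain ⟨hjlt, hrow⟩ := List.getElem?_eq_some_iff.mp h0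
    have hrest : rest = row.drop (jn+1) := by
      have hd1 : (row.drop jn).drop 1 = row.drop (jn + 1) := by
        rw [List.drop_drop]
      rw [← hd1, ← hdrop]
      simp
    simp only [runScanB]
    by_cases hrd : r ≤ day
    · rw [if_pos hrd]
      by_cases hamt : (run : Int) + 1 ≥ amount
      · rw [if_pos hamt]
        have hae : amount = (run : Int) + 1 := by omega
        have hw : windowAll row day amount.toNat (jn - run) = true := by
          rw [windowAll_eq_true_iff]
          intro k hk hka
          by_cases hkr : k = run
          · have he : jn - run + k = jn := by omega
            simp only [he]
            rw [hrow]
            exact hrd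
          · obtain ⟨h, hle⟩ := hstreak (jn - run + k) (by omega) (by omega)
            exact hle
        rw [firstGood_good row day amount.toNat (jn - run) (by omega) hw]
        simp only [Option.map_some]
        congr 1
        omega
      · rw [if_neg hamt]
        have hstreak' : ∀ t : Nat, (jn+1) - (run+1) ≤ t → t < jn+1 →
            ∃ h : t < row.length, row[t] ≤ day := by
          intro t h1 h2
          by_cases htj : t = jn
          · subst htj
            exact ⟨hjlt, by rw [hrow]; exact hrd⟩
          · exact hstreak t (by omega) (by omega)
        have hih := ih (jn+1) (run+1) hrest (by omega) (by push_cast; omega) hstreak'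
        simp only [show jn + 1 - (run + 1) = jn - run from by omega] at hih
        push_cast at hih
        exact hih
    · rw [if_neg hrd]
      have hbad : day < r := by omega
      have hih := ih (jn+1) 0 hrest (by omega) (by omega)
        (by intro t h1 h2; omega)
      simp only [Nat.sub_zero] at hih
      push_cast at hih
      rw [hih]
      have hskip := firstGood_skip row day amount.toNat (run + 1) (jn - run)
        (fun t h1 h2 => windowAll_false_of_bad row day amount.toNat t jn
          (by omega) (by omega) hjlt (by rw [hrow]; exact hbad))
      rw [show (jn - run) + (run + 1) = jn + 1 from by omega] at hskip
      rw [← hskip]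

theorem floor_eq (day amount : Int) (ha : 1 ≤ amount) (row : List Int) (i : Int) :
    whileA row day amount i (((row.length : Int) - amount + 1).toNat) 0 =
      runScanB day amount i row 0 0 := by
  have h1 := whileA_eq row day amount i ha (((row.length : Int) - amount + 1).toNat) 0
    le_rfl (by omega)
  have h2 := runScan_eq row day amount i ha row 0 0 (by simp) le_rfl (by omega)
    (by intro t ht1 ht2; omega)
  exact h1.trans h2.symm

theorem outer_eq (day amount : Int) (ha : 1 ≤ amount) :
    ∀ (hs : List (List Int)) (i : Int),
      floorA day amount (hs.zip (count_empty_room hs day)) i = floorsB day amount hs i := by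
  intro hs
  induction hs with
  | nil => intro i; rfl
  | cons row rest ih =>
    intro i
    have ihz : floorA day amount (rest.zip (count_empty_room rest day)) (i+1) =
        floorsB day amount rest (i+1) := ih (i+1)
    simp only [count_empty_room, List.map_cons, List.zip_cons_cons] at ihz ⊢
    simp only [floorA, floorsB]
    by_cases hc : row.foldl (fun c j => if j ≤ day then c + 1 else c) 0 < amount
    · rw [if_pos hc]
      have hcp : (row.countP (fun v => decide (v ≤ day)) : Int) < amount := by
        have hfc := foldl_count_eq day row 0
        omega
      have h2 := runScan_eq row day amount i ha row 0 0 (by simp) le_rfl (by omega)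
        (by intro t ht1 ht2; omega)
      rw [prefilter row day amount ha hcp] at h2
      simp only [Option.map_none] at h2
      have h2' : runScanB day amount i row 0 0 = none := by exact_mod_cast h2
      rw [h2']
      exact ihz
    · rw [if_neg hc]
      rw [floor_eq day amount ha row i]
      cases hrs : runScanB day amount i row 0 0 with
      | some v => rfl
      | none => exact ihz

-- ===== VERDICT (by name: the statement is the Claim_ definition above) =====
theorem find_room_pos_spec : Claim_equal_find_room_pos := by
  intro hotel day amount _ hpre
  unfold Spec_find_room_pos find_room_pos find_room_pos_alt
  exact outer_eq day amount hpre hotel 0
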